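-- pv_equiv track=rewrite | github.com/lucaski2/Competitive-Programming | USACO/AirCownditioning2/main.py | does_work
-- ===== SOURCE A (Python) =====
-- def does_work(conditioners_in_use, num_conditioners, cows, conditioners):
--     price = 0
--     for cond in conditioners_in_use:
--         cur_conditioner = conditioners[cond]
--         price += cur_conditioner[3]
--         for i in range(cur_conditioner[0], cur_conditioner[1] + 1):
--             cows[i] -= cur_conditioner[2]
--
--     return -1 if max(cows) > 0 else price
-- ===== SOURCE B (Python) =====
-- def does_work(conditioners_in_use, num_conditioners, cows, conditioners):
--     n = len(cows)
--     delta = [0] * (n + 1)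
--     price = 0
--     for cond in conditioners_in_use:
--         cur = conditioners[cond]
--         price += cur[3]
--         start, end, val = cur[0], cur[1], cur[2]
--         if start <= end:
--             delta[start] += val
--             delta[end + 1] -= val
--     running = 0
--     for i in range(n):
--         running += delta[i]
--         cows[i] -= running
--     return -1 if any(c > 0 for c in cows) else price
-- ===== Notes on version B (the rewrite author's own statement) =====
-- stated objective: faster
-- what changed: Replaces the per-conditioner inner loop over every cow in the cooled range by difference-array updates (two endpoint writes per conditioner) followed by one prefix-sum pass over the cows, and replaces max(cows)>0 by an any() scan.
-- outside the precondition, e.g. on does_work([0], 1, [3], [[-1, -1, 3, 4]]): A returns 4, B returns -1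
import Mathlib
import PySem

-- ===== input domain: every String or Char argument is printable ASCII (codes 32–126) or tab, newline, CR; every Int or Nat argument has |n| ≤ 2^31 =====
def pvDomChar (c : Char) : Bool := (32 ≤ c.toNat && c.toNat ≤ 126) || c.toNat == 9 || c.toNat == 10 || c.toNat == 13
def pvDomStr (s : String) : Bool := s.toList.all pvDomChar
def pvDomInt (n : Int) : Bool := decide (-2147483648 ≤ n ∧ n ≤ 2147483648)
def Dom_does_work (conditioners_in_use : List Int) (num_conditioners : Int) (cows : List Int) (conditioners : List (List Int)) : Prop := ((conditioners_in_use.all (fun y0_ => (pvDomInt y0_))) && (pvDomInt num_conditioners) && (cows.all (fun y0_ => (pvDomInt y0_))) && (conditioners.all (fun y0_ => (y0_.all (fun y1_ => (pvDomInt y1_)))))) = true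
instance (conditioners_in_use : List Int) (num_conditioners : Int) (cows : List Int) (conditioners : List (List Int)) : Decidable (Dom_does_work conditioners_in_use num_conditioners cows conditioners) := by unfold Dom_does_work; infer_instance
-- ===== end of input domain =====

-- B replaces A's per-conditioner inner loop over the cooled range by difference-array
-- endpoint updates plus one prefix-sum pass (asymptotically less work); equivalence is about
-- the RETURN value only (both Pythons also mutate `cows` in place, to the same final state).


-- ===== PORT A =====
def does_work (conditioners_in_use : List Int) (num_conditioners : Int) (cows : List Int) (conditioners : List (List Int)) : Int :=
  let st := conditioners_in_use.foldl
    (fun (s : Int × List Int) cond =>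
      (s.1 + PySem.List.pyGetD (PySem.List.pyGetD conditioners cond []) 3 0,
       (PySem.List.pyRange (PySem.List.pyGetD (PySem.List.pyGetD conditioners cond []) 0 0)
          (PySem.List.pyGetD (PySem.List.pyGetD conditioners cond []) 1 0 + 1) 1).foldl
         (fun cs i => PySem.List.pySetD cs i
            (PySem.List.pyGetD cs i 0 - PySem.List.pyGetD (PySem.List.pyGetD conditioners cond []) 2 0)) s.2))
    (0, cows)
  match PySem.List.max? st.2 (fun y => y) with
  | none => 0   -- ValueError (max of empty list) in Python; excluded by Pre_
  | some m => if m > 0 then -1 else st.1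

-- ===== PORT B =====
def does_work_alt (conditioners_in_use : List Int) (num_conditioners : Int) (cows : List Int) (conditioners : List (List Int)) : Int :=
  let n : Nat := cows.length
  let st := conditioners_in_use.foldl
    (fun (s : Int × List Int) cond =>
      (s.1 + PySem.List.pyGetD (PySem.List.pyGetD conditioners cond []) 3 0,
       if PySem.List.pyGetD (PySem.List.pyGetD conditioners cond []) 0 0 ≤
            PySem.List.pyGetD (PySem.List.pyGetD conditioners cond []) 1 0 then
         PySem.List.pySetD
           (PySem.List.pySetD s.2 (PySem.List.pyGetD (PySem.List.pyGetD conditioners cond []) 0 0)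
             (PySem.List.pyGetD s.2 (PySem.List.pyGetD (PySem.List.pyGetD conditioners cond []) 0 0) 0 +
              PySem.List.pyGetD (PySem.List.pyGetD conditioners cond []) 2 0))
           (PySem.List.pyGetD (PySem.List.pyGetD conditioners cond []) 1 0 + 1)
           (PySem.List.pyGetD
              (PySem.List.pySetD s.2 (PySem.List.pyGetD (PySem.List.pyGetD conditioners cond []) 0 0)
                (PySem.List.pyGetD s.2 (PySem.List.pyGetD (PySem.List.pyGetD conditioners cond []) 0 0) 0 +
                 PySem.List.pyGetD (PySem.List.pyGetD conditioners cond []) 2 0))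
              (PySem.List.pyGetD (PySem.List.pyGetD conditioners cond []) 1 0 + 1) 0 -
            PySem.List.pyGetD (PySem.List.pyGetD conditioners cond []) 2 0)
       else s.2))
    (0, List.replicate (n + 1) 0)
  let fin := (PySem.List.pyRange 0 (n : Int) 1).foldl
    (fun (s : Int × List Int) i =>
      (s.1 + PySem.List.pyGetD st.2 i 0,
       PySem.List.pySetD s.2 i (PySem.List.pyGetD s.2 i 0 - (s.1 + PySem.List.pyGetD st.2 i 0))))
    (0, cows)
  if fin.2.any (fun c => 0 < c) then -1 else st.1

-- ===== PRECONDITION & SPEC =====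
-- Pre_ excludes the inputs where the Python A raises (an index in conditioners_in_use outside
-- conditioners, a used row with fewer than 4 fields, a range index outside cows, empty cows),
-- and also inputs whose nonempty cooling range has a negative endpoint, on which A silently
-- cools cows via Python's accidental negative-index wraparound — a corner no caller specifies
-- and on which B's difference array would wrap differently.
def Pre_does_work (conditioners_in_use : List Int) (num_conditioners : Int) (cows : List Int) (conditioners : List (List Int)) : Prop :=
  cows ≠ [] ∧ ∀ cond ∈ conditioners_in_use,
    PySem.Raise.InRange conditioners.length cond ∧
    4 ≤ (PySem.List.pyGetD conditioners cond []).length ∧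
    (PySem.List.pyGetD (PySem.List.pyGetD conditioners cond []) 0 0 ≤
       PySem.List.pyGetD (PySem.List.pyGetD conditioners cond []) 1 0 →
     0 ≤ PySem.List.pyGetD (PySem.List.pyGetD conditioners cond []) 0 0 ∧
       PySem.List.pyGetD (PySem.List.pyGetD conditioners cond []) 1 0 < (cows.length : Int))
instance (conditioners_in_use : List Int) (num_conditioners : Int) (cows : List Int) (conditioners : List (List Int)) : Decidable (Pre_does_work conditioners_in_use num_conditioners cows conditioners) := by unfold Pre_does_work; infer_instance

def pvWitness_does_work : List Int × Int × List Int × List (List Int) := ([0], 1, [2, -1], [[0, 1, 3, 7]])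

def Spec_does_work (conditioners_in_use : List Int) (num_conditioners : Int) (cows : List Int) (conditioners : List (List Int)) (out : Int) : Prop := out = does_work_alt conditioners_in_use num_conditioners cows conditioners
instance (conditioners_in_use : List Int) (num_conditioners : Int) (cows : List Int) (conditioners : List (List Int)) (out : Int) : Decidable (Spec_does_work conditioners_in_use num_conditioners cows conditioners out) := by unfold Spec_does_work; infer_instance

-- ===== CLAIM (what is proved, stated in full; the proofs are below) =====
def Claim_equal_does_work : Prop := ∀ (conditioners_in_use : List Int) (num_conditioners : Int) (cows : List Int) (conditioners : List (List Int)), Dom_does_work conditioners_in_use num_conditioners cows conditioners → Pre_does_work conditioners_in_use num_conditioners cows conditioners → Spec_does_work conditioners_in_use num_conditioners cows conditioners (does_work conditioners_in_use num_conditioners cows conditioners)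

-- ===== LEMMAS AND PROOFS =====

-- row shorthand
def pvRow (conditioners : List (List Int)) (c : Int) : List Int := PySem.List.pyGetD conditioners c []

-- per-conditioner bound extracted from Pre_
def pvPOK (n : Int) (conditioners : List (List Int)) (c : Int) : Prop :=
  PySem.List.pyGetD (pvRow conditioners c) 0 0 ≤ PySem.List.pyGetD (pvRow conditioners c) 1 0 →
    0 ≤ PySem.List.pyGetD (pvRow conditioners c) 0 0 ∧ PySem.List.pyGetD (pvRow conditioners c) 1 0 < n

-- total subtraction applied to cow k by the used conditioners
def pvS (conditioners : List (List Int)) (conds : List Int) (k : Int) : Int :=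
  (conds.map (fun c =>
    if PySem.List.pyGetD (pvRow conditioners c) 0 0 ≤ k ∧ k ≤ PySem.List.pyGetD (pvRow conditioners c) 1 0
    then PySem.List.pyGetD (pvRow conditioners c) 2 0 else 0)).sum

-- difference-array cell k accumulated by B's first loop
def pvD (conditioners : List (List Int)) (conds : List Int) (k : Int) : Int :=
  (conds.map (fun c =>
    if PySem.List.pyGetD (pvRow conditioners c) 0 0 ≤ PySem.List.pyGetD (pvRow conditioners c) 1 0 then
      (if k = PySem.List.pyGetD (pvRow conditioners c) 0 0 then PySem.List.pyGetD (pvRow conditioners c) 2 0 else 0) -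
      (if k = PySem.List.pyGetD (pvRow conditioners c) 1 0 + 1 then PySem.List.pyGetD (pvRow conditioners c) 2 0 else 0)
    else 0)).sum

-- prefix sum of f over [i, m)
def pvPSF (f : Nat → Int) (i m : Nat) : Int :=
  if _h : i < m then f i + pvPSF f (i + 1) m else 0
termination_by m - i

theorem pvPSF_pos (f : Nat → Int) (i m : Nat) (h : i < m) :
    pvPSF f i m = f i + pvPSF f (i + 1) m := by
  rw [pvPSF, dif_pos h]

theorem pvPSF_neg (f : Nat → Int) (i m : Nat) (h : ¬ i < m) : pvPSF f i m = 0 := by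
  rw [pvPSF, dif_neg h]

theorem pvPSF_congr (f g : Nat → Int) (i m : Nat) (h : ∀ j, i ≤ j → j < m → f j = g j) :
    pvPSF f i m = pvPSF g i m := by
  fun_induction pvPSF f i m with
  | case1 i hi ih =>
    rw [pvPSF_pos g i m hi, h i le_rfl hi, ih (fun j hj1 hj2 => h j (by omega) hj2)]
  | case2 i hi => rw [pvPSF_neg g i m hi]

theorem pvPSF_sub (f g : Nat → Int) (i m : Nat) :
    pvPSF (fun j => f j - g j) i m = pvPSF f i m - pvPSF g i m := by
  fun_induction pvPSF f i m with
  | case1 i hi ih =>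
    rw [pvPSF_pos (fun j => f j - g j) i m hi, pvPSF_pos g i m hi, ih]
    ring
  | case2 i hi =>
    rw [pvPSF_neg (fun j => f j - g j) i m hi, pvPSF_neg g i m hi]
    ring

theorem pvPSF_add (f g : Nat → Int) (i m : Nat) :
    pvPSF (fun j => f j + g j) i m = pvPSF f i m + pvPSF g i m := by
  fun_induction pvPSF f i m with
  | case1 i hi ih =>
    rw [pvPSF_pos (fun j => f j + g j) i m hi, pvPSF_pos g i m hi, ih]
    ring
  | case2 i hi =>
    rw [pvPSF_neg (fun j => f j + g j) i m hi, pvPSF_neg g i m hi]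
    ring

theorem pvPSF_zero (i m : Nat) : pvPSF (fun _ => (0 : Int)) i m = 0 := by
  fun_induction pvPSF (fun _ => (0 : Int)) i m with
  | case1 i hi ih => omega
  | case2 i hi => rfl

theorem pvPSF_single (x v : Int) (i m : Nat) :
    pvPSF (fun j => if (j : Int) = x then v else 0) i m =
      if (i : Int) ≤ x ∧ x < (m : Int) then v else 0 := by
  fun_induction pvPSF (fun j => if (j : Int) = x then v else 0) i m with
  | case1 i hi ih =>
    rw [ih]
    split_ifs <;> omega
  | case2 i hi =>
    split_ifs <;> omega

theorem pvGetD_set (l : List Int) (i k : Nat) (w : Int) (hi : i < l.length) :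
    (l.set i w).getD k 0 = if k = i then w else l.getD k 0 := by
  by_cases hki : k = i
  · subst hki
    simp [List.getD_eq_getElem?_getD, hi]
  · simp [List.getD_eq_getElem?_getD, List.getElem?_set_ne (show i ≠ k by omega), hki]

-- A's inner range loop, pointwise
theorem pvRangeSub_spec (v b : Int) : ∀ (fuel : Nat) (a : Int) (cs : List Int),
    (b + 1 - a).toNat ≤ fuel → (a ≤ b → 0 ≤ a ∧ b < (cs.length : Int)) →
    ((PySem.List.pyRange a (b + 1) 1).foldl
        (fun cs i => PySem.List.pySetD cs i (PySem.List.pyGetD cs i 0 - v)) cs).length = cs.length ∧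
    ∀ k : Nat, k < cs.length →
      ((PySem.List.pyRange a (b + 1) 1).foldl
          (fun cs i => PySem.List.pySetD cs i (PySem.List.pyGetD cs i 0 - v)) cs).getD k 0 =
        cs.getD k 0 - (if a ≤ (k : Int) ∧ (k : Int) ≤ b then v else 0) := by
  intro fuel
  induction fuel with
  | zero =>
    intro a cs hf h
    rw [PySem.List.pyRange_one_eq_nil (by omega : b + 1 ≤ a)]
    refine ⟨rfl, fun k hk => ?_⟩
    have hno : ¬ (a ≤ (k : Int) ∧ (k : Int) ≤ b) := by omega
    simp [hno]
  | succ fuel ih =>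
    intro a cs hf h
    by_cases hba : b + 1 ≤ a
    · rw [PySem.List.pyRange_one_eq_nil hba]
      refine ⟨rfl, fun k hk => ?_⟩
      have hno : ¬ (a ≤ (k : Int) ∧ (k : Int) ≤ b) := by omega
      simp [hno]
    · have hab : a ≤ b := by omega
      obtain ⟨ha0, hblen⟩ := h hab
      rw [PySem.List.pyRange_one_cons (by omega : a < b + 1)]
      simp only [List.foldl_cons]
      have hlen' : (PySem.List.pySetD cs a (PySem.List.pyGetD cs a 0 - v)).length = cs.length :=
        PySem.List.length_pySetD _ _ _
      obtain ⟨hL, hE⟩ := ih (a + 1) (PySem.List.pySetD cs a (PySem.List.pyGetD cs a 0 - v))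
        (by omega) (fun _ => ⟨by omega, by rw [hlen']; exact hblen⟩)
      refine ⟨by rw [hL, hlen'], fun k hk => ?_⟩
      rw [hE k (by rw [hlen']; exact hk)]
      have halen : a.toNat < cs.length := by omega
      have hsd : PySem.List.pySetD cs a (PySem.List.pyGetD cs a 0 - v) =
          cs.set a.toNat (cs.getD a.toNat 0 - v) := by
        rw [PySem.List.pySetD_of_nonneg cs _ ha0,
            PySem.List.pyGetD_eq_getElem cs 0 ha0 (by omega),
            List.getD_eq_getElem cs 0 halen]
      rw [hsd]
      by_cases hka : k = a.toNat
      · subst hka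
        rw [List.getD_eq_getElem _ 0 (by simpa using halen), List.getElem_set_self (by simpa using halen),
            List.getD_eq_getElem cs 0 halen]
        have h1 : ¬ (a + 1 ≤ (a.toNat : Int) ∧ (a.toNat : Int) ≤ b) := by omega
        have h2 : a ≤ (a.toNat : Int) ∧ (a.toNat : Int) ≤ b := by constructor <;> omega
        rw [if_neg h1, if_pos h2]
        ring
      · have hget : (cs.set a.toNat (cs.getD a.toNat 0 - v)).getD k 0 = cs.getD k 0 := by
          simp [List.getD_eq_getElem?_getD, List.getElem?_set_ne (show a.toNat ≠ k by omega)]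
        rw [hget]
        have hcast : (k : Int) ≠ a := by omega
        split_ifs <;> omega

-- A's outer loop, cows component, pointwise
theorem pvApplyA_spec (conditioners : List (List Int)) (conds : List Int) : ∀ (cs : List Int),
    (∀ c ∈ conds, pvPOK (cs.length : Int) conditioners c) →
    (conds.foldl
        (fun cs cond =>
          (PySem.List.pyRange (PySem.List.pyGetD (PySem.List.pyGetD conditioners cond []) 0 0)
              (PySem.List.pyGetD (PySem.List.pyGetD conditioners cond []) 1 0 + 1) 1).foldl
            (fun cs i => PySem.List.pySetD cs i
              (PySem.List.pyGetD cs i 0 - PySem.List.pyGetD (PySem.List.pyGetD conditioners cond []) 2 0)) cs) cs).length = cs.length ∧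
    ∀ k : Nat, k < cs.length →
      (conds.foldl
          (fun cs cond =>
            (PySem.List.pyRange (PySem.List.pyGetD (PySem.List.pyGetD conditioners cond []) 0 0)
                (PySem.List.pyGetD (PySem.List.pyGetD conditioners cond []) 1 0 + 1) 1).foldl
              (fun cs i => PySem.List.pySetD cs i
                (PySem.List.pyGetD cs i 0 - PySem.List.pyGetD (PySem.List.pyGetD conditioners cond []) 2 0)) cs) cs).getD k 0 =
        cs.getD k 0 - pvS conditioners conds (k : Int) := by
  induction conds with
  | nil => intro cs _; exact ⟨rfl, fun k hk => by simp [pvS]⟩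
  | cons c t iht =>
    intro cs h
    have hok := h c (List.mem_cons_self)
    unfold pvPOK pvRow at hok
    simp only [List.foldl_cons]
    obtain ⟨hL1, hE1⟩ := pvRangeSub_spec
      (PySem.List.pyGetD (PySem.List.pyGetD conditioners c []) 2 0)
      (PySem.List.pyGetD (PySem.List.pyGetD conditioners c []) 1 0)
      (PySem.List.pyGetD (PySem.List.pyGetD conditioners c []) 1 0 + 1 -
        PySem.List.pyGetD (PySem.List.pyGetD conditioners c []) 0 0).toNat
      (PySem.List.pyGetD (PySem.List.pyGetD conditioners c []) 0 0) cs le_rfl hok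
    obtain ⟨hL, hE⟩ := iht
      ((PySem.List.pyRange (PySem.List.pyGetD (PySem.List.pyGetD conditioners c []) 0 0)
          (PySem.List.pyGetD (PySem.List.pyGetD conditioners c []) 1 0 + 1)).foldl
        (fun cs i => PySem.List.pySetD cs i
          (PySem.List.pyGetD cs i 0 - PySem.List.pyGetD (PySem.List.pyGetD conditioners c []) 2 0)) cs)
      (by rw [hL1]; exact fun c' hc' => h c' (List.mem_cons_of_mem _ hc'))
    refine ⟨by rw [hL, hL1], fun k hk => ?_⟩
    rw [hE k (by rw [hL1]; exact hk), hE1 k hk]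
    have hs : pvS conditioners (c :: t) (k : Int) =
        (if PySem.List.pyGetD (pvRow conditioners c) 0 0 ≤ (k : Int) ∧
            (k : Int) ≤ PySem.List.pyGetD (pvRow conditioners c) 1 0
         then PySem.List.pyGetD (pvRow conditioners c) 2 0 else 0) + pvS conditioners t (k : Int) := by
      simp [pvS]
    rw [hs]
    unfold pvRow
    ring

-- B's first loop (difference array), pointwise
theorem pvApplyB_spec (conditioners : List (List Int)) (n : Nat) (conds : List Int) : ∀ (ds : List Int),
    ds.length = n + 1 → (∀ c ∈ conds, pvPOK (n : Int) conditioners c) →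
    (conds.foldl
        (fun ds cond =>
          if PySem.List.pyGetD (PySem.List.pyGetD conditioners cond []) 0 0 ≤
               PySem.List.pyGetD (PySem.List.pyGetD conditioners cond []) 1 0 then
            PySem.List.pySetD
              (PySem.List.pySetD ds (PySem.List.pyGetD (PySem.List.pyGetD conditioners cond []) 0 0)
                (PySem.List.pyGetD ds (PySem.List.pyGetD (PySem.List.pyGetD conditioners cond []) 0 0) 0 +
                 PySem.List.pyGetD (PySem.List.pyGetD conditioners cond []) 2 0))
              (PySem.List.pyGetD (PySem.List.pyGetD conditioners cond []) 1 0 + 1)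
              (PySem.List.pyGetD
                 (PySem.List.pySetD ds (PySem.List.pyGetD (PySem.List.pyGetD conditioners cond []) 0 0)
                   (PySem.List.pyGetD ds (PySem.List.pyGetD (PySem.List.pyGetD conditioners cond []) 0 0) 0 +
                    PySem.List.pyGetD (PySem.List.pyGetD conditioners cond []) 2 0))
                 (PySem.List.pyGetD (PySem.List.pyGetD conditioners cond []) 1 0 + 1) 0 -
               PySem.List.pyGetD (PySem.List.pyGetD conditioners cond []) 2 0)
          else ds) ds).length = n + 1 ∧
    ∀ k : Nat, k < n + 1 →
      (conds.foldl
          (fun ds cond =>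
            if PySem.List.pyGetD (PySem.List.pyGetD conditioners cond []) 0 0 ≤
                 PySem.List.pyGetD (PySem.List.pyGetD conditioners cond []) 1 0 then
              PySem.List.pySetD
                (PySem.List.pySetD ds (PySem.List.pyGetD (PySem.List.pyGetD conditioners cond []) 0 0)
                  (PySem.List.pyGetD ds (PySem.List.pyGetD (PySem.List.pyGetD conditioners cond []) 0 0) 0 +
                   PySem.List.pyGetD (PySem.List.pyGetD conditioners cond []) 2 0))
                (PySem.List.pyGetD (PySem.List.pyGetD conditioners cond []) 1 0 + 1)
                (PySem.List.pyGetD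
                   (PySem.List.pySetD ds (PySem.List.pyGetD (PySem.List.pyGetD conditioners cond []) 0 0)
                     (PySem.List.pyGetD ds (PySem.List.pyGetD (PySem.List.pyGetD conditioners cond []) 0 0) 0 +
                      PySem.List.pyGetD (PySem.List.pyGetD conditioners cond []) 2 0))
                   (PySem.List.pyGetD (PySem.List.pyGetD conditioners cond []) 1 0 + 1) 0 -
                 PySem.List.pyGetD (PySem.List.pyGetD conditioners cond []) 2 0)
            else ds) ds).getD k 0 =
        ds.getD k 0 + pvD conditioners conds (k : Int) := by
  induction conds with
  | nil => intro ds h _; exact ⟨h, fun k hk => by simp [pvD]⟩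
  | cons c t iht =>
    intro ds h hok
    have hc := hok c (List.mem_cons_self)
    unfold pvPOK pvRow at hc
    simp only [List.foldl_cons]
    set r0 := PySem.List.pyGetD (PySem.List.pyGetD conditioners c []) 0 0 with hr0def
    set r1 := PySem.List.pyGetD (PySem.List.pyGetD conditioners c []) 1 0 with hr1def
    set v := PySem.List.pyGetD (PySem.List.pyGetD conditioners c []) 2 0 with hvdef
    have hpvD : ∀ k : Nat, pvD conditioners (c :: t) (k : Int) =
        (if r0 ≤ r1 then
          (if (k : Int) = r0 then v else 0) - (if (k : Int) = r1 + 1 then v else 0)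
         else 0) + pvD conditioners t (k : Int) := by
      intro k; simp [pvD, pvRow, hr0def, hr1def, hvdef]
    by_cases hg : r0 ≤ r1
    · rw [if_pos hg]
      obtain ⟨h0, h1⟩ := hc hg
      have hr0lt : r0.toNat < ds.length := by omega
      have hd1 : PySem.List.pySetD ds r0 (PySem.List.pyGetD ds r0 0 + v) =
          ds.set r0.toNat (ds.getD r0.toNat 0 + v) := by
        rw [PySem.List.pySetD_of_nonneg ds _ h0,
            PySem.List.pyGetD_eq_getElem ds 0 h0 (by omega),
            List.getD_eq_getElem ds 0 hr0lt]
      rw [hd1]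
      have hd1len : (ds.set r0.toNat (ds.getD r0.toNat 0 + v)).length = ds.length := by
        simp
      have hr1lt : (r1 + 1).toNat < ds.length := by omega
      have hd2 : PySem.List.pySetD (ds.set r0.toNat (ds.getD r0.toNat 0 + v)) (r1 + 1)
            (PySem.List.pyGetD (ds.set r0.toNat (ds.getD r0.toNat 0 + v)) (r1 + 1) 0 - v) =
          (ds.set r0.toNat (ds.getD r0.toNat 0 + v)).set (r1 + 1).toNat
            ((ds.set r0.toNat (ds.getD r0.toNat 0 + v)).getD (r1 + 1).toNat 0 - v) := by
        rw [PySem.List.pySetD_of_nonneg _ _ (by omega : (0:Int) ≤ r1 + 1)]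
        congr 1
        rw [PySem.List.pyGetD_eq_getElem _ 0 (by omega : (0:Int) ≤ r1 + 1) (by rw [hd1len]; omega)]
        congr 1
        exact (List.getD_eq_getElem (ds.set r0.toNat (ds.getD r0.toNat 0 + v)) 0
          (show (r1 + 1).toNat < (ds.set r0.toNat (ds.getD r0.toNat 0 + v)).length by
            rw [hd1len]; exact hr1lt)).symm
      rw [hd2]
      have hds1 : ∀ m : Nat, (ds.set r0.toNat (ds.getD r0.toNat 0 + v)).getD m 0 =
          if m = r0.toNat then ds.getD r0.toNat 0 + v else ds.getD m 0 :=
        fun m => pvGetD_set ds r0.toNat m _ hr0lt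
      have hds2 : ∀ m : Nat,
          ((ds.set r0.toNat (ds.getD r0.toNat 0 + v)).set (r1 + 1).toNat
            ((ds.set r0.toNat (ds.getD r0.toNat 0 + v)).getD (r1 + 1).toNat 0 - v)).getD m 0 =
          if m = (r1 + 1).toNat then
            (ds.set r0.toNat (ds.getD r0.toNat 0 + v)).getD (r1 + 1).toNat 0 - v
          else (ds.set r0.toNat (ds.getD r0.toNat 0 + v)).getD m 0 :=
        fun m => pvGetD_set _ (r1 + 1).toNat m _ (by rw [hd1len]; exact hr1lt)
      obtain ⟨hLt, hEt⟩ := iht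
        ((ds.set r0.toNat (ds.getD r0.toNat 0 + v)).set (r1 + 1).toNat
          ((ds.set r0.toNat (ds.getD r0.toNat 0 + v)).getD (r1 + 1).toNat 0 - v))
        (by simp [h]) (fun c' hc' => hok c' (List.mem_cons_of_mem _ hc'))
      refine ⟨hLt, fun k hk => ?_⟩
      rw [hEt k hk, hds2 k, hds1 k, hds1 (r1 + 1).toNat,
          if_neg (show ¬ (r1 + 1).toNat = r0.toNat by omega), hpvD k, if_pos hg]
      by_cases hk0 : k = r0.toNat
      · subst hk0
        rw [if_neg (show ¬ r0.toNat = (r1 + 1).toNat by omega), if_pos rfl,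
            if_pos (show ((r0.toNat : Nat) : Int) = r0 by omega),
            if_neg (show ¬ ((r0.toNat : Nat) : Int) = r1 + 1 by omega)]
        ring
      · by_cases hk1 : k = (r1 + 1).toNat
        · subst hk1
          rw [if_pos rfl,
              if_neg (show ¬ (((r1 + 1).toNat : Nat) : Int) = r0 by omega),
              if_pos (show (((r1 + 1).toNat : Nat) : Int) = r1 + 1 by omega)]
          ring
        · rw [if_neg hk1, if_neg hk0,
              if_neg (show ¬ ((k : Nat) : Int) = r0 by omega),
              if_neg (show ¬ ((k : Nat) : Int) = r1 + 1 by omega)]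
          ring
    · rw [if_neg hg]
      obtain ⟨hLt, hEt⟩ := iht ds h (fun c' hc' => hok c' (List.mem_cons_of_mem _ hc'))
      refine ⟨hLt, fun k hk => ?_⟩
      rw [hEt k hk, hpvD k, if_neg hg]
      ring

-- B's prefix-sum pass, pointwise
theorem pvPrefix_spec (delta : List Int) (n : Nat) : ∀ (fuel i : Nat) (run : Int) (cs : List Int),
    cs.length = n → n - i ≤ fuel →
    (((PySem.List.pyRange (i : Int) (n : Int) 1).foldl
        (fun (s : Int × List Int) j =>
          (s.1 + PySem.List.pyGetD delta j 0,
           PySem.List.pySetD s.2 j (PySem.List.pyGetD s.2 j 0 - (s.1 + PySem.List.pyGetD delta j 0))))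
        (run, cs)).2).length = n ∧
    ∀ k : Nat, k < n →
      (((PySem.List.pyRange (i : Int) (n : Int) 1).foldl
          (fun (s : Int × List Int) j =>
            (s.1 + PySem.List.pyGetD delta j 0,
             PySem.List.pySetD s.2 j (PySem.List.pyGetD s.2 j 0 - (s.1 + PySem.List.pyGetD delta j 0))))
          (run, cs)).2).getD k 0 =
        if k < i then cs.getD k 0
        else cs.getD k 0 - (run + pvPSF (fun j => delta.getD j 0) i (k + 1)) := by
  intro fuel
  induction fuel with
  | zero =>
    intro i run cs hcs hf
    have hin : (n : Int) ≤ (i : Int) := by exact_mod_cast (by omega : n ≤ i)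
    rw [PySem.List.pyRange_one_eq_nil hin]
    simp only [List.foldl_nil]
    exact ⟨hcs, fun k hk => by rw [if_pos (by omega)]⟩
  | succ fuel ih =>
    intro i run cs hcs hf
    by_cases hni : n ≤ i
    · have hin : (n : Int) ≤ (i : Int) := by exact_mod_cast hni
      rw [PySem.List.pyRange_one_eq_nil hin]
      simp only [List.foldl_nil]
      exact ⟨hcs, fun k hk => by rw [if_pos (by omega)]⟩
    · have hlt : (i : Int) < (n : Int) := by exact_mod_cast (by omega : i < n)
      rw [PySem.List.pyRange_one_cons hlt]
      simp only [List.foldl_cons, PySem.List.pyGetD_natCast, PySem.List.pySetD_natCast]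
      have hcast : ((i : Int) + 1) = ((i + 1 : Nat) : Int) := by push_cast; ring
      rw [hcast]
      obtain ⟨hL, hE⟩ := ih (i + 1) (run + delta.getD i 0)
        (cs.set i (cs.getD i 0 - (run + delta.getD i 0))) (by simp [hcs]) (by omega)
      refine ⟨by rw [hL], fun k hk => ?_⟩
      rw [hE k hk, pvGetD_set cs i k _ (by omega)]
      by_cases hki : k < i
      · rw [if_pos (by omega : k < i + 1), if_neg (by omega : ¬ k = i), if_pos hki]
      · by_cases hke : k = i
        · subst hke
          rw [if_pos (by omega : k < k + 1), if_pos rfl, if_neg (by omega : ¬ k < k),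
              pvPSF_pos _ k (k + 1) (by omega), pvPSF_neg _ (k + 1) (k + 1) (by omega)]
          ring
        · rw [if_neg (by omega : ¬ k < i + 1), if_neg hke, if_neg hki,
              pvPSF_pos _ i (k + 1) (by omega)]
          ring

-- the summed difference array reproduces pvS
theorem pvPSF_D_eq_S (conditioners : List (List Int)) (n : Nat) (conds : List Int)
    (hok : ∀ c ∈ conds, pvPOK (n : Int) conditioners c) (k : Nat) (hk : k < n) :
    pvPSF (fun j => pvD conditioners conds (j : Int)) 0 (k + 1) = pvS conditioners conds (k : Int) := by
  revert hok
  induction conds with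
  | nil =>
    intro _
    rw [pvPSF_congr _ (fun _ => 0) _ _ (fun j _ _ => by simp [pvD]), pvPSF_zero]
    simp [pvS]
  | cons c t iht =>
    intro hok
    have hc := hok c (List.mem_cons_self)
    unfold pvPOK pvRow at hc
    set r0 := PySem.List.pyGetD (PySem.List.pyGetD conditioners c []) 0 0 with hr0def
    set r1 := PySem.List.pyGetD (PySem.List.pyGetD conditioners c []) 1 0 with hr1def
    set v := PySem.List.pyGetD (PySem.List.pyGetD conditioners c []) 2 0 with hvdef
    have hsplit : pvPSF (fun j => pvD conditioners (c :: t) (j : Int)) 0 (k + 1) =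
        pvPSF (fun j =>
          (if r0 ≤ r1 then
            (if (j : Int) = r0 then v else 0) - (if (j : Int) = r1 + 1 then v else 0)
           else 0)) 0 (k + 1) +
        pvPSF (fun j => pvD conditioners t (j : Int)) 0 (k + 1) := by
      rw [← pvPSF_add]
      exact pvPSF_congr _ _ _ _ (fun j _ _ => by simp [pvD, pvRow, hr0def, hr1def, hvdef])
    rw [hsplit, iht (fun c' h' => hok c' (List.mem_cons_of_mem _ h'))]
    have hpvS : pvS conditioners (c :: t) (k : Int) =
        (if r0 ≤ (k : Int) ∧ (k : Int) ≤ r1 then v else 0) + pvS conditioners t (k : Int) := by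
      simp [pvS, pvRow, hr0def, hr1def, hvdef]
    rw [hpvS]
    congr 1
    by_cases hg : r0 ≤ r1
    · obtain ⟨h0, h1⟩ := hc hg
      rw [pvPSF_congr _
            (fun j => (if (j : Int) = r0 then v else 0) - (if (j : Int) = r1 + 1 then v else 0))
            _ _ (fun j _ _ => by rw [if_pos hg]),
          pvPSF_sub, pvPSF_single, pvPSF_single]
      split_ifs <;> omega
    · rw [pvPSF_congr _ (fun _ => 0) _ _ (fun j _ _ => by rw [if_neg hg]), pvPSF_zero,
          if_neg (by omega)]

-- max(L) > 0 iff some element > 0, for nonempty L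
theorem pvMax_any (L : List Int) (p : Int) (hL : L ≠ []) :
    (match PySem.List.max? L (fun y => y) with
     | none => (0 : Int)
     | some m => if m > 0 then -1 else p) =
    (if L.any (fun c => 0 < c) then -1 else p) := by
  cases hm : PySem.List.max? L (fun y => y) with
  | none => exact absurd ((PySem.List.max?_eq_none_iff L _).mp hm) hL
  | some m =>
    have hmem := PySem.List.max?_mem hm
    have hmax := PySem.List.max?_isMax hm
    show (if m > 0 then (-1 : Int) else p) = _
    by_cases h0 : m > 0
    · rw [if_pos h0, if_pos (by simp only [List.any_eq_true, decide_eq_true_iff]; exact ⟨m, hmem, h0⟩)]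
    · rw [if_neg h0, if_neg (by
        simp only [List.any_eq_true, decide_eq_true_iff, not_exists, not_and]
        intro x hx
        have := hmax x hx
        omega)]

-- ===== VERDICT (by name: the statement is the Claim_ definition above) =====
theorem does_work_spec : Claim_equal_does_work := by
  intro use num cows conditioners _ hPre
  obtain ⟨hne, hok⟩ := hPre
  have hok' : ∀ c ∈ use, pvPOK (cows.length : Int) conditioners c := by
    intro c hc
    unfold pvPOK pvRow
    exact (hok c hc).2.2
  simp only [Spec_does_work, does_work, does_work_alt]
  rw [PySem.List.foldl_prod_mk
    (f := fun p cond => p + PySem.List.pyGetD (PySem.List.pyGetD conditioners cond []) 3 0)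
    (g := fun cs cond =>
      (PySem.List.pyRange (PySem.List.pyGetD (PySem.List.pyGetD conditioners cond []) 0 0)
          (PySem.List.pyGetD (PySem.List.pyGetD conditioners cond []) 1 0 + 1)).foldl
        (fun cs i => PySem.List.pySetD cs i
          (PySem.List.pyGetD cs i 0 - PySem.List.pyGetD (PySem.List.pyGetD conditioners cond []) 2 0)) cs)]
  rw [PySem.List.foldl_prod_mk
    (f := fun p cond => p + PySem.List.pyGetD (PySem.List.pyGetD conditioners cond []) 3 0)
    (g := fun ds cond =>
      if PySem.List.pyGetD (PySem.List.pyGetD conditioners cond []) 0 0 ≤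
           PySem.List.pyGetD (PySem.List.pyGetD conditioners cond []) 1 0 then
        PySem.List.pySetD
          (PySem.List.pySetD ds (PySem.List.pyGetD (PySem.List.pyGetD conditioners cond []) 0 0)
            (PySem.List.pyGetD ds (PySem.List.pyGetD (PySem.List.pyGetD conditioners cond []) 0 0) 0 +
             PySem.List.pyGetD (PySem.List.pyGetD conditioners cond []) 2 0))
          (PySem.List.pyGetD (PySem.List.pyGetD conditioners cond []) 1 0 + 1)
          (PySem.List.pyGetD
             (PySem.List.pySetD ds (PySem.List.pyGetD (PySem.List.pyGetD conditioners cond []) 0 0)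
               (PySem.List.pyGetD ds (PySem.List.pyGetD (PySem.List.pyGetD conditioners cond []) 0 0) 0 +
                PySem.List.pyGetD (PySem.List.pyGetD conditioners cond []) 2 0))
             (PySem.List.pyGetD (PySem.List.pyGetD conditioners cond []) 1 0 + 1) 0 -
           PySem.List.pyGetD (PySem.List.pyGetD conditioners cond []) 2 0)
      else ds)]
  obtain ⟨hLA, hEA⟩ := pvApplyA_spec conditioners use cows hok'
  obtain ⟨hLB, hEB⟩ := pvApplyB_spec conditioners cows.length use
    (List.replicate (cows.length + 1) 0) (by simp) hok'
  obtain ⟨hLP, hEP⟩ := pvPrefix_spec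
    (use.foldl (fun ds cond =>
      if PySem.List.pyGetD (PySem.List.pyGetD conditioners cond []) 0 0 ≤
           PySem.List.pyGetD (PySem.List.pyGetD conditioners cond []) 1 0 then
        PySem.List.pySetD
          (PySem.List.pySetD ds (PySem.List.pyGetD (PySem.List.pyGetD conditioners cond []) 0 0)
            (PySem.List.pyGetD ds (PySem.List.pyGetD (PySem.List.pyGetD conditioners cond []) 0 0) 0 +
             PySem.List.pyGetD (PySem.List.pyGetD conditioners cond []) 2 0))
          (PySem.List.pyGetD (PySem.List.pyGetD conditioners cond []) 1 0 + 1)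
          (PySem.List.pyGetD
             (PySem.List.pySetD ds (PySem.List.pyGetD (PySem.List.pyGetD conditioners cond []) 0 0)
               (PySem.List.pyGetD ds (PySem.List.pyGetD (PySem.List.pyGetD conditioners cond []) 0 0) 0 +
                PySem.List.pyGetD (PySem.List.pyGetD conditioners cond []) 2 0))
             (PySem.List.pyGetD (PySem.List.pyGetD conditioners cond []) 1 0 + 1) 0 -
           PySem.List.pyGetD (PySem.List.pyGetD conditioners cond []) 2 0)
      else ds) (List.replicate (cows.length + 1) 0))
    cows.length cows.length 0 0 cows rfl (by omega)
  simp only []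
  simp only [Nat.cast_zero] at hLP hEP
  have hpos : 0 < cows.length := List.length_pos_of_ne_nil hne
  have hdelta : ∀ j : Nat, j < cows.length + 1 →
      (use.foldl (fun ds cond =>
        if PySem.List.pyGetD (PySem.List.pyGetD conditioners cond []) 0 0 ≤
             PySem.List.pyGetD (PySem.List.pyGetD conditioners cond []) 1 0 then
          PySem.List.pySetD
            (PySem.List.pySetD ds (PySem.List.pyGetD (PySem.List.pyGetD conditioners cond []) 0 0)
              (PySem.List.pyGetD ds (PySem.List.pyGetD (PySem.List.pyGetD conditioners cond []) 0 0) 0 +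
               PySem.List.pyGetD (PySem.List.pyGetD conditioners cond []) 2 0))
            (PySem.List.pyGetD (PySem.List.pyGetD conditioners cond []) 1 0 + 1)
            (PySem.List.pyGetD
               (PySem.List.pySetD ds (PySem.List.pyGetD (PySem.List.pyGetD conditioners cond []) 0 0)
                 (PySem.List.pyGetD ds (PySem.List.pyGetD (PySem.List.pyGetD conditioners cond []) 0 0) 0 +
                  PySem.List.pyGetD (PySem.List.pyGetD conditioners cond []) 2 0))
               (PySem.List.pyGetD (PySem.List.pyGetD conditioners cond []) 1 0 + 1) 0 -
             PySem.List.pyGetD (PySem.List.pyGetD conditioners cond []) 2 0)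
        else ds) (List.replicate (cows.length + 1) 0)).getD j 0 =
      pvD conditioners use (j : Int) := by
    intro j hj
    rw [hEB j hj]
    simp
  have hfin : ∀ k : Nat, k < cows.length →
      ((PySem.List.pyRange 0 (cows.length : Int)).foldl
        (fun (s : Int × List Int) i =>
          (s.1 + PySem.List.pyGetD (use.foldl (fun ds cond =>
            if PySem.List.pyGetD (PySem.List.pyGetD conditioners cond []) 0 0 ≤
                 PySem.List.pyGetD (PySem.List.pyGetD conditioners cond []) 1 0 then
              PySem.List.pySetD
                (PySem.List.pySetD ds (PySem.List.pyGetD (PySem.List.pyGetD conditioners cond []) 0 0)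
                  (PySem.List.pyGetD ds (PySem.List.pyGetD (PySem.List.pyGetD conditioners cond []) 0 0) 0 +
                   PySem.List.pyGetD (PySem.List.pyGetD conditioners cond []) 2 0))
                (PySem.List.pyGetD (PySem.List.pyGetD conditioners cond []) 1 0 + 1)
                (PySem.List.pyGetD
                   (PySem.List.pySetD ds (PySem.List.pyGetD (PySem.List.pyGetD conditioners cond []) 0 0)
                     (PySem.List.pyGetD ds (PySem.List.pyGetD (PySem.List.pyGetD conditioners cond []) 0 0) 0 +
                      PySem.List.pyGetD (PySem.List.pyGetD conditioners cond []) 2 0))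
                   (PySem.List.pyGetD (PySem.List.pyGetD conditioners cond []) 1 0 + 1) 0 -
                 PySem.List.pyGetD (PySem.List.pyGetD conditioners cond []) 2 0)
            else ds) (List.replicate (cows.length + 1) 0)) i 0,
           PySem.List.pySetD s.2 i (PySem.List.pyGetD s.2 i 0 -
             (s.1 + PySem.List.pyGetD (use.foldl (fun ds cond =>
               if PySem.List.pyGetD (PySem.List.pyGetD conditioners cond []) 0 0 ≤
                    PySem.List.pyGetD (PySem.List.pyGetD conditioners cond []) 1 0 then
                 PySem.List.pySetD
                   (PySem.List.pySetD ds (PySem.List.pyGetD (PySem.List.pyGetD conditioners cond []) 0 0)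
                     (PySem.List.pyGetD ds (PySem.List.pyGetD (PySem.List.pyGetD conditioners cond []) 0 0) 0 +
                      PySem.List.pyGetD (PySem.List.pyGetD conditioners cond []) 2 0))
                   (PySem.List.pyGetD (PySem.List.pyGetD conditioners cond []) 1 0 + 1)
                   (PySem.List.pyGetD
                      (PySem.List.pySetD ds (PySem.List.pyGetD (PySem.List.pyGetD conditioners cond []) 0 0)
                        (PySem.List.pyGetD ds (PySem.List.pyGetD (PySem.List.pyGetD conditioners cond []) 0 0) 0 +
                         PySem.List.pyGetD (PySem.List.pyGetD conditioners cond []) 2 0))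
                      (PySem.List.pyGetD (PySem.List.pyGetD conditioners cond []) 1 0 + 1) 0 -
                    PySem.List.pyGetD (PySem.List.pyGetD conditioners cond []) 2 0)
               else ds) (List.replicate (cows.length + 1) 0)) i 0))))
        (0, cows)).2.getD k 0 = cows.getD k 0 - pvS conditioners use (k : Int) := by
    intro k hk
    rw [hEP k hk, if_neg (by omega),
        pvPSF_congr _ (fun j => pvD conditioners use (j : Int)) 0 (k + 1)
          (fun j _ hj => hdelta j (by omega)),
        pvPSF_D_eq_S conditioners cows.length use hok' k hk]
    ring
  have hEq : ((PySem.List.pyRange 0 (cows.length : Int)).foldl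
        (fun (s : Int × List Int) i =>
          (s.1 + PySem.List.pyGetD (use.foldl (fun ds cond =>
            if PySem.List.pyGetD (PySem.List.pyGetD conditioners cond []) 0 0 ≤
                 PySem.List.pyGetD (PySem.List.pyGetD conditioners cond []) 1 0 then
              PySem.List.pySetD
                (PySem.List.pySetD ds (PySem.List.pyGetD (PySem.List.pyGetD conditioners cond []) 0 0)
                  (PySem.List.pyGetD ds (PySem.List.pyGetD (PySem.List.pyGetD conditioners cond []) 0 0) 0 +
                   PySem.List.pyGetD (PySem.List.pyGetD conditioners cond []) 2 0))
                (PySem.List.pyGetD (PySem.List.pyGetD conditioners cond []) 1 0 + 1)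
                (PySem.List.pyGetD
                   (PySem.List.pySetD ds (PySem.List.pyGetD (PySem.List.pyGetD conditioners cond []) 0 0)
                     (PySem.List.pyGetD ds (PySem.List.pyGetD (PySem.List.pyGetD conditioners cond []) 0 0) 0 +
                      PySem.List.pyGetD (PySem.List.pyGetD conditioners cond []) 2 0))
                   (PySem.List.pyGetD (PySem.List.pyGetD conditioners cond []) 1 0 + 1) 0 -
                 PySem.List.pyGetD (PySem.List.pyGetD conditioners cond []) 2 0)
            else ds) (List.replicate (cows.length + 1) 0)) i 0,
           PySem.List.pySetD s.2 i (PySem.List.pyGetD s.2 i 0 -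
             (s.1 + PySem.List.pyGetD (use.foldl (fun ds cond =>
               if PySem.List.pyGetD (PySem.List.pyGetD conditioners cond []) 0 0 ≤
                    PySem.List.pyGetD (PySem.List.pyGetD conditioners cond []) 1 0 then
                 PySem.List.pySetD
                   (PySem.List.pySetD ds (PySem.List.pyGetD (PySem.List.pyGetD conditioners cond []) 0 0)
                     (PySem.List.pyGetD ds (PySem.List.pyGetD (PySem.List.pyGetD conditioners cond []) 0 0) 0 +
                      PySem.List.pyGetD (PySem.List.pyGetD conditioners cond []) 2 0))
                   (PySem.List.pyGetD (PySem.List.pyGetD conditioners cond []) 1 0 + 1)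
                   (PySem.List.pyGetD
                      (PySem.List.pySetD ds (PySem.List.pyGetD (PySem.List.pyGetD conditioners cond []) 0 0)
                        (PySem.List.pyGetD ds (PySem.List.pyGetD (PySem.List.pyGetD conditioners cond []) 0 0) 0 +
                         PySem.List.pyGetD (PySem.List.pyGetD conditioners cond []) 2 0))
                      (PySem.List.pyGetD (PySem.List.pyGetD conditioners cond []) 1 0 + 1) 0 -
                    PySem.List.pyGetD (PySem.List.pyGetD conditioners cond []) 2 0)
               else ds) (List.replicate (cows.length + 1) 0)) i 0))))
        (0, cows)).2 =
      use.foldl (fun cs cond =>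
        (PySem.List.pyRange (PySem.List.pyGetD (PySem.List.pyGetD conditioners cond []) 0 0)
            (PySem.List.pyGetD (PySem.List.pyGetD conditioners cond []) 1 0 + 1)).foldl
          (fun cs i => PySem.List.pySetD cs i
            (PySem.List.pyGetD cs i 0 - PySem.List.pyGetD (PySem.List.pyGetD conditioners cond []) 2 0)) cs) cows := by
    apply List.ext_getElem (by rw [hLP, hLA])
    intro k h1 h2
    have h1' : k < cows.length := by rw [hLP] at h1; exact h1
    rw [← List.getD_eq_getElem _ 0 h1, ← List.getD_eq_getElem _ 0 h2, hfin k h1', hEA k h1']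
  rw [hEq]
  have hne' : use.foldl (fun cs cond =>
        (PySem.List.pyRange (PySem.List.pyGetD (PySem.List.pyGetD conditioners cond []) 0 0)
            (PySem.List.pyGetD (PySem.List.pyGetD conditioners cond []) 1 0 + 1)).foldl
          (fun cs i => PySem.List.pySetD cs i
            (PySem.List.pyGetD cs i 0 - PySem.List.pyGetD (PySem.List.pyGetD conditioners cond []) 2 0)) cs) cows ≠ [] := by
    intro h0
    rw [h0] at hLA
    simp at hLA
    omega
  exact pvMax_any _ _ hne'
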